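-- pv_equiv track=rewrite | github.com/kot0fey/Asterisk-AI-Voice-Agent | src/tools/parser.py | _strip_control_tokens
-- ===== SOURCE A (Python) =====
-- _CONTROL_TOKEN_PREFIXES = ("<|system|>", "<|user|>", "<|assistant|>", "<|enduser|>", "<|end|>")
--
-- def _strip_control_tokens(text: str) -> str:
--     """
--     Remove common chat-template control tokens that occasionally leak into outputs.
--     """
--     if not text:
--         return text
--     # If a control token appears, truncate at its first occurrence to avoid speaking garbage.
--     lowest = None
--     for token in _CONTROL_TOKEN_PREFIXES:
--         idx = text.find(token)
--         if idx != -1: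
--             lowest = idx if lowest is None else min(lowest, idx)
--     if lowest is not None:
--         text = text[:lowest]
--     return text.strip()
-- ===== SOURCE B (Python) =====
-- _CONTROL_TOKEN_PREFIXES = ("<|system|>", "<|user|>", "<|assistant|>", "<|enduser|>", "<|end|>")
--
-- def _strip_control_tokens(text: str) -> str:
--     if not text:
--         return text
--     # Single left-to-right scan: truncate at the first offset where any control token starts.
--     for i in range(len(text)):
--         if any(text.startswith(tok, i) for tok in _CONTROL_TOKEN_PREFIXES):
--             return text[:i].strip()
--     return text.strip()
-- ===== Notes on version B (the rewrite author's own statement) =====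
-- stated objective: alternative
-- what changed: Replaces five separate str.find scans plus a running minimum with one left-to-right scan that stops at the first offset where any control token starts (early exit, single pass).
import Mathlib
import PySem

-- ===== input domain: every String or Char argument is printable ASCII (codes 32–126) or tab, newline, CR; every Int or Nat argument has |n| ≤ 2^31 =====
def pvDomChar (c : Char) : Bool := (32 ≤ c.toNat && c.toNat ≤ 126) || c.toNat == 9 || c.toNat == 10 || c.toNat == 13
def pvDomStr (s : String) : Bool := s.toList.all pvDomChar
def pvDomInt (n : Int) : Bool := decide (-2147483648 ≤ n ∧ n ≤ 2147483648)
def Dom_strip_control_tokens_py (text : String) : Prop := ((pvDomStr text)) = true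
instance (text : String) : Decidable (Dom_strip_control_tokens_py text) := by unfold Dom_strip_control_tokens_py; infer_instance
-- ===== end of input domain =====

-- B replaces A's five separate find scans plus a running minimum with one left-to-right scan
-- that truncates at the first offset where any control token starts (alternative decomposition, same cost class).


-- ===== PORT A =====
def ctrlTokens : List String := ["<|system|>", "<|user|>", "<|assistant|>", "<|enduser|>", "<|end|>"]

def strip_control_tokens_py (text : String) : String :=
  if text = "" then text
  else
    let lowest : Option Int := ctrlTokens.foldl (fun lowest token =>
      let idx := PySem.Str.find text token
      if idx ≠ -1 then
        some (match lowest with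
          | none => idx
          | some l => min l idx)
      else lowest) none
    let text' : String := match lowest with
      | some l => PySem.Str.slice text none (some l)
      | none => text
    PySem.Str.strip text'

-- ===== PORT B =====
-- single scan: first index i such that some control token starts at offset i
def cutScan (toks : List (List Char)) : List Char → Option Nat
  | [] => none
  | c :: rest =>
      if toks.any (fun t => t.isPrefixOf (c :: rest)) then some 0
      else (cutScan toks rest).map (· + 1)

def strip_control_tokens_py_alt (text : String) : String :=
  if text = "" then text
  else
    let cs := text.toList
    match cutScan (ctrlTokens.map String.toList) cs with
    | some i => String.ofList (PySem.Chars.strip (cs.take i))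
    | none => String.ofList (PySem.Chars.strip cs)

-- ===== PRECONDITION & SPEC =====
def Spec_strip_control_tokens_py (text : String) (out : String) : Prop := out = strip_control_tokens_py_alt text
instance (text : String) (out : String) : Decidable (Spec_strip_control_tokens_py text out) := by unfold Spec_strip_control_tokens_py; infer_instance

-- ===== CLAIM (what is proved, stated in full; the proofs are below) =====
def Claim_equal_strip_control_tokens_py : Prop := ∀ (text : String), Dom_strip_control_tokens_py text → Spec_strip_control_tokens_py text (strip_control_tokens_py text)

-- ===== LEMMAS AND PROOFS =====

-- B's scan: a `some j` result points at a position where some token is a prefix, and at no earlier one.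
lemma cutScan_some_spec (toks : List (List Char)) :
    ∀ (s : List Char) (j : Nat), cutScan toks s = some j →
      (∃ t ∈ toks, t <+: s.drop j) ∧ ∀ i < j, ¬ ∃ t ∈ toks, t <+: s.drop i := by
  intro s
  induction s with
  | nil => intro j h; simp [cutScan] at h
  | cons c rest ih =>
    intro j h
    by_cases hp : toks.any (fun t => t.isPrefixOf (c :: rest)) = true
    · simp [cutScan, hp] at h
      subst h
      refine ⟨?_, by omega⟩
      rcases List.any_eq_true.mp hp with ⟨t, ht, hpre⟩
      exact ⟨t, ht, List.isPrefixOf_iff_prefix.mp hpre⟩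
    · simp only [cutScan, if_neg hp, Option.map_eq_some_iff] at h
      rcases h with ⟨j0, h0, hj⟩
      subst hj
      obtain ⟨⟨t, ht, hpre⟩, hmin⟩ := ih j0 h0
      refine ⟨⟨t, ht, by simpa [List.drop_succ_cons] using hpre⟩, ?_⟩
      intro i hi
      cases i with
      | zero =>
        rintro ⟨t, ht, hpre0⟩
        exact hp (List.any_eq_true.mpr ⟨t, ht, List.isPrefixOf_iff_prefix.mpr (by simpa using hpre0)⟩)
      | succ i0 =>
        rw [List.drop_succ_cons]
        exact hmin i0 (by omega)

-- B's scan: a `none` result means no token is a prefix at any position.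
lemma cutScan_none_spec (toks : List (List Char)) (htoks : ∀ t ∈ toks, t ≠ []) :
    ∀ (s : List Char), cutScan toks s = none → ∀ i, ¬ ∃ t ∈ toks, t <+: s.drop i := by
  intro s
  induction s with
  | nil =>
    rintro - i ⟨t, ht, hpre⟩
    exact htoks t ht (List.prefix_nil.mp (by simpa using hpre))
  | cons c rest ih =>
    intro h i
    by_cases hp : toks.any (fun t => t.isPrefixOf (c :: rest)) = true
    · simp [cutScan, hp] at h
    · simp only [cutScan, if_neg hp, Option.map_eq_none_iff] at h
      cases i with
      | zero =>
        rintro ⟨t, ht, hpre⟩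
        exact hp (List.any_eq_true.mpr ⟨t, ht, List.isPrefixOf_iff_prefix.mpr (by simpa using hpre)⟩)
      | succ i0 =>
        rw [List.drop_succ_cons]
        exact ih h i0

-- A's fold: a `none` result means every token's find is -1.
lemma lfold_none (text : String) :
    ∀ (toks : List String) (acc : Option Int),
      toks.foldl (fun lowest token =>
        let idx := PySem.Str.find text token
        if idx ≠ -1 then
          some (match lowest with | none => idx | some l => min l idx)
        else lowest) acc = none →
      acc = none ∧ ∀ t ∈ toks, PySem.Str.find text t = -1 := by
  intro toks
  induction toks with
  | nil => intro acc h; rw [List.foldl_nil] at h; exact ⟨h, by simp⟩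
  | cons t ts ih =>
    intro acc h
    rw [List.foldl_cons] at h
    cases acc with
    | none =>
      change List.foldl _ (if PySem.Str.find text t ≠ -1 then some (PySem.Str.find text t) else none) ts = none at h
      by_cases hi : PySem.Str.find text t = -1
      · rw [if_neg (not_not_intro hi)] at h
        obtain ⟨h1, h2⟩ := ih _ h
        refine ⟨rfl, ?_⟩
        intro t' ht'
        rcases List.mem_cons.mp ht' with rfl | h'
        · exact hi
        · exact h2 t' h'
      · rw [if_pos hi] at h
        obtain ⟨h1, -⟩ := ih _ h
        exact absurd h1 (Option.some_ne_none _)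
    | some l0 =>
      change List.foldl _ (if PySem.Str.find text t ≠ -1 then some (min l0 (PySem.Str.find text t)) else some l0) ts = none at h
      by_cases hi : PySem.Str.find text t = -1
      · rw [if_neg (not_not_intro hi)] at h
        obtain ⟨h1, -⟩ := ih _ h
        exact absurd h1 (Option.some_ne_none _)
      · rw [if_pos hi] at h
        obtain ⟨h1, -⟩ := ih _ h
        exact absurd h1 (Option.some_ne_none _)

-- A's fold: a `some m` result is the minimum of the non-(-1) finds of the tokens (and ≥ 0).
lemma lfold_some (text : String) :
    ∀ (toks : List String) (acc : Option Int) (m : Int),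
      (∀ l, acc = some l → 0 ≤ l) →
      toks.foldl (fun lowest token =>
        let idx := PySem.Str.find text token
        if idx ≠ -1 then
          some (match lowest with | none => idx | some l => min l idx)
        else lowest) acc = some m →
      0 ≤ m ∧ (acc = some m ∨ ∃ t ∈ toks, PySem.Str.find text t = m) ∧
      (∀ l, acc = some l → m ≤ l) ∧
      (∀ t ∈ toks, PySem.Str.find text t = -1 ∨ m ≤ PySem.Str.find text t) := by
  intro toks
  induction toks with
  | nil =>
    intro acc m hacc h
    rw [List.foldl_nil] at h
    refine ⟨hacc m h, Or.inl h, ?_, by simp⟩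
    intro l hl; rw [h] at hl; injection hl with hh; omega
  | cons t ts ih =>
    intro acc m hacc h
    rw [List.foldl_cons] at h
    have hneg : (-1 : Int) ≤ PySem.Str.find text t := by
      rw [PySem.Str.find_eq]; exact PySem.Chars.neg_one_le_find _ _
    cases acc with
    | none =>
      change List.foldl _ (if PySem.Str.find text t ≠ -1 then some (PySem.Str.find text t) else none) ts = some m at h
      by_cases hi : PySem.Str.find text t = -1
      · rw [if_neg (not_not_intro hi)] at h
        obtain ⟨hm0, hor, hle, hall⟩ := ih none m (by simp) h
        refine ⟨hm0, ?_, by simp, ?_⟩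
        · rcases hor with heq | ⟨t', ht', hf⟩
          · exact absurd heq (by simp)
          · exact Or.inr ⟨t', List.mem_cons_of_mem _ ht', hf⟩
        · intro t' ht'
          rcases List.mem_cons.mp ht' with rfl | h'
          · exact Or.inl hi
          · exact hall t' h'
      · have hidx0 : (0 : Int) ≤ PySem.Str.find text t := by omega
        rw [if_pos hi] at h
        obtain ⟨hm0, hor, hle, hall⟩ :=
          ih (some (PySem.Str.find text t)) m
            (fun l hl => by injection hl with hh; omega) h
        have hmv : m ≤ PySem.Str.find text t := hle _ rfl
        refine ⟨hm0, Or.inr ?_, by simp, ?_⟩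
        · rcases hor with heq | ⟨t', ht', hf⟩
          · exact ⟨t, List.mem_cons_self, (Option.some.inj heq)⟩
          · exact ⟨t', List.mem_cons_of_mem _ ht', hf⟩
        · intro t' ht'
          rcases List.mem_cons.mp ht' with rfl | h'
          · exact Or.inr hmv
          · exact hall t' h'
    | some l0 =>
      have hl0 : (0 : Int) ≤ l0 := hacc l0 rfl
      change List.foldl _ (if PySem.Str.find text t ≠ -1 then some (min l0 (PySem.Str.find text t)) else some l0) ts = some m at h
      by_cases hi : PySem.Str.find text t = -1
      · rw [if_neg (not_not_intro hi)] at h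
        obtain ⟨hm0, hor, hle, hall⟩ := ih (some l0) m hacc h
        refine ⟨hm0, hor.imp id (fun ⟨t', ht', hf⟩ => ⟨t', List.mem_cons_of_mem _ ht', hf⟩), hle, ?_⟩
        intro t' ht'
        rcases List.mem_cons.mp ht' with rfl | h'
        · exact Or.inl hi
        · exact hall t' h'
      · have hidx0 : (0 : Int) ≤ PySem.Str.find text t := by omega
        rw [if_pos hi] at h
        obtain ⟨hm0, hor, hle, hall⟩ :=
          ih (some (min l0 (PySem.Str.find text t))) m
            (fun l hl => by injection hl with hh; rw [← hh]; exact le_min hl0 hidx0) h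
        have hmv : m ≤ min l0 (PySem.Str.find text t) := hle _ rfl
        refine ⟨hm0, ?_, ?_, ?_⟩
        · rcases hor with heq | ⟨t', ht', hf⟩
          · have hm := Option.some.inj heq
            rcases min_cases l0 (PySem.Str.find text t) with ⟨hmin, -⟩ | ⟨hmin, -⟩
            · exact Or.inl (by rw [← hm, hmin])
            · exact Or.inr ⟨t, List.mem_cons_self, by rw [← hm, hmin]⟩
          · exact Or.inr ⟨t', List.mem_cons_of_mem _ ht', hf⟩
        · intro l hl
          injection hl with hh
          have := min_le_left l0 (PySem.Str.find text t)
          omega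
        · intro t' ht'
          rcases List.mem_cons.mp ht' with rfl | h'
          · have := min_le_right l0 (PySem.Str.find text t')
            exact Or.inr (by omega)
          · exact hall t' h'

-- ===== VERDICT (by name: the statement is the Claim_ definition above) =====
theorem strip_control_tokens_py_spec : Claim_equal_strip_control_tokens_py := by
  unfold Claim_equal_strip_control_tokens_py
  intro text _
  unfold Spec_strip_control_tokens_py
  by_cases h0 : text = ""
  · simp [strip_control_tokens_py, strip_control_tokens_py_alt, h0]
  · have htoks : ∀ t ∈ ctrlTokens.map String.toList, t ≠ [] := by decide
    cases hF : ctrlTokens.foldl (fun lowest token =>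
        let idx := PySem.Str.find text token
        if idx ≠ -1 then
          some (match lowest with | none => idx | some l => min l idx)
        else lowest) none with
    | none =>
      obtain ⟨-, hall⟩ := lfold_none text ctrlTokens none hF
      have hcut : cutScan (ctrlTokens.map String.toList) text.toList = none := by
        cases hcs : cutScan (ctrlTokens.map String.toList) text.toList with
        | none => rfl
        | some j =>
          obtain ⟨⟨tk, ht, hpre⟩, -⟩ := cutScan_some_spec _ _ j hcs
          obtain ⟨tok, htok, rfl⟩ := List.mem_map.mp ht
          have hinf : tok.toList <:+: text.toList :=
            hpre.isInfix.trans (List.drop_suffix j text.toList).isInfix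
          have hfc : PySem.Chars.find text.toList tok.toList = -1 := by
            rw [← PySem.Str.find_eq]; exact hall tok htok
          exact absurd hinf ((PySem.Chars.find_eq_neg_one_iff _ _).mp hfc)
      unfold strip_control_tokens_py strip_control_tokens_py_alt
      rw [if_neg h0, if_neg h0]
      simp only [hF, hcut]
      rw [← String.ofList_toList (s := PySem.Str.strip text), PySem.Str.toList_strip]
    | some m =>
      obtain ⟨hm0, hor, -, hall⟩ := lfold_some text ctrlTokens none m (by simp) hF
      rcases hor with heq | ⟨t, ht, hfind⟩
      · exact absurd heq (by simp)
      have hf : PySem.Chars.find text.toList t.toList = m := by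
        rw [← PySem.Str.find_eq]; exact hfind
      obtain ⟨hpre, -⟩ := PySem.Chars.find_spec (s := text.toList) (sub := t.toList)
        (by rw [hf]; exact hm0)
      rw [hf] at hpre
      have hP : ∃ tk ∈ ctrlTokens.map String.toList, tk <+: text.toList.drop m.toNat :=
        ⟨t.toList, List.mem_map_of_mem ht, hpre⟩
      have hlow : ∀ i < m.toNat, ¬ ∃ tk ∈ ctrlTokens.map String.toList, tk <+: text.toList.drop i := by
        rintro i hi ⟨tk, htk, hp⟩
        obtain ⟨tok, htok, rfl⟩ := List.mem_map.mp htk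
        rcases hall tok htok with hneg1 | hge
        · have hfc : PySem.Chars.find text.toList tok.toList = -1 := by
            rw [← PySem.Str.find_eq]; exact hneg1
          exact ((PySem.Chars.find_eq_neg_one_iff _ _).mp hfc)
            (hp.isInfix.trans (List.drop_suffix i text.toList).isInfix)
        · have hFe : PySem.Chars.find text.toList tok.toList = PySem.Str.find text tok :=
            (PySem.Str.find_eq text tok).symm
          obtain ⟨-, hmin2⟩ := PySem.Chars.find_spec (s := text.toList) (sub := tok.toList)
            (by rw [hFe]; omega)
          exact hmin2 i (by rw [hFe]; omega) hp
      have hcut : cutScan (ctrlTokens.map String.toList) text.toList = some m.toNat := by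
        cases hcs : cutScan (ctrlTokens.map String.toList) text.toList with
        | none => exact absurd hP (cutScan_none_spec _ htoks _ hcs m.toNat)
        | some j =>
          obtain ⟨hPj, hminj⟩ := cutScan_some_spec _ _ j hcs
          have h1 : ¬ j < m.toNat := fun hlt => hlow j hlt hPj
          have h2 : ¬ m.toNat < j := fun hlt => hminj m.toNat hlt hP
          rw [show j = m.toNat by omega]
      unfold strip_control_tokens_py strip_control_tokens_py_alt
      rw [if_neg h0, if_neg h0]
      simp only [hF, hcut]
      rw [← String.ofList_toList (s := PySem.Str.strip (PySem.Str.slice text none (some m))),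
          PySem.Str.toList_strip]
      congr 1
      rw [PySem.Str.toList_slice, PySem.Chars.slice_eq_listSlice, PySem.List.slice_to text.toList hm0]
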